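-- pv_equiv track=rewrite | github.com/cortana-hd/cortana-external | backtester/governance/authority.py | _highest_autonomy_mode
-- ===== SOURCE A (Python) =====
-- from typing import Any, Mapping, Sequence
--
-- VALID_AUTONOMY_MODES = ("advisory", "paper", "supervised_live", "guarded_live")
--
-- def _highest_autonomy_mode(values: Sequence[str] | Any) -> str:
--     order = {mode: idx for idx, mode in enumerate(VALID_AUTONOMY_MODES)}
--     best = "advisory"
--     for raw in values:
--         mode = str(raw or "").strip().lower()
--         if order.get(mode, -1) > order.get(best, -1):
--             best = mode
--     return best
-- ===== SOURCE B (Python) =====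
-- VALID_AUTONOMY_MODES = ("advisory", "paper", "supervised_live", "guarded_live")
--
-- def _highest_autonomy_mode(values):
--     present = {str(raw or "").strip().lower() for raw in values}
--     for mode in reversed(VALID_AUTONOMY_MODES):
--         if mode in present:
--             return mode
--     return "advisory"
-- ===== Notes on version B (the rewrite author's own statement) =====
-- stated objective: simpler
-- what changed: Replaces the running-max scan with a dict-of-ranks by a set of normalized values plus a single highest-first scan over the fixed mode tuple with early return.
import Mathlib
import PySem

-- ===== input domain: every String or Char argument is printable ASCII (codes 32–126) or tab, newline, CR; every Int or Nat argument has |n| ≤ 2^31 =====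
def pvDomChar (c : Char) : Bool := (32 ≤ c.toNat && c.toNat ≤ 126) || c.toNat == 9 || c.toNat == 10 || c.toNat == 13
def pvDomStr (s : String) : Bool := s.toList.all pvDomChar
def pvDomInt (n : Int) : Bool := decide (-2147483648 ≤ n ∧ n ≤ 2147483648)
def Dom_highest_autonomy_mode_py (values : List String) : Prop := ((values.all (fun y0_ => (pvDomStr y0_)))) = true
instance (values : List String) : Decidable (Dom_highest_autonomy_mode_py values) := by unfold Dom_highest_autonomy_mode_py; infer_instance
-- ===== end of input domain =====

-- B changes A's running-max scan (ranks from a dict) into a set of normalized values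
-- plus a highest-first scan over the fixed mode tuple; same result, simpler structure.

-- module constant VALID_AUTONOMY_MODES
def pvModes : List String := ["advisory", "paper", "supervised_live", "guarded_live"]

-- str(raw or "").strip().lower()  (exact: `raw or ""` on a str is `raw` unless empty)
def pvNorm (raw : String) : String :=
  PySem.Str.lower (PySem.Str.strip (if raw == "" then "" else raw))

-- ===== PORT A =====
-- order = {mode: idx for idx, mode in enumerate(VALID_AUTONOMY_MODES)}
def pvOrder : PySem.Dict String Int :=
  (PySem.List.enumerate pvModes).foldl (fun d p => d.insert p.2 p.1) PySem.Dict.empty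

def highest_autonomy_mode_py (values : List String) : String :=
  values.foldl
    (fun best raw =>
      let mode := pvNorm raw
      if pvOrder.getD mode (-1) > pvOrder.getD best (-1) then mode else best)
    "advisory"

-- ===== PORT B =====
def highest_autonomy_mode_py_alt (values : List String) : String :=
  let present : PySem.Set String := PySem.Set.ofList (values.map pvNorm)
  ((pvModes.reverse).find? (fun m => PySem.Set.contains present m)).getD "advisory"

-- ===== PRECONDITION & SPEC =====
def Spec_highest_autonomy_mode_py (values : List String) (out : String) : Prop := out = highest_autonomy_mode_py_alt values
instance (values : List String) (out : String) : Decidable (Spec_highest_autonomy_mode_py values out) := by unfold Spec_highest_autonomy_mode_py; infer_instance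

-- ===== CLAIM (what is proved, stated in full; the proofs are below) =====
def Claim_equal_highest_autonomy_mode_py : Prop := ∀ (values : List String), Dom_highest_autonomy_mode_py values → Spec_highest_autonomy_mode_py values (highest_autonomy_mode_py values)

-- ===== LEMMAS AND PROOFS =====

-- rank of a mode string, as A's `order.get(m, -1)` computes it
def pvRank (m : String) : Int :=
  if m = "advisory" then 0 else if m = "paper" then 1
  else if m = "supervised_live" then 2 else if m = "guarded_live" then 3 else -1

def pvToMode (r : Int) : String :=
  if r = 3 then "guarded_live" else if r = 2 then "supervised_live"
  else if r = 1 then "paper" else "advisory"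

def pvStep (a : Int) (v : String) : Int := max a (pvRank (pvNorm v))

def pvStepA (best raw : String) : String :=
  if pvRank (pvNorm raw) > pvRank best then pvNorm raw else best

def pvIsMode (m : String) : Prop :=
  m = "advisory" ∨ m = "paper" ∨ m = "supervised_live" ∨ m = "guarded_live"

lemma pvOrder_getD (m : String) : pvOrder.getD m (-1) = pvRank m := by
  have h : pvOrder = PySem.Dict.mk
      [("advisory", 0), ("paper", 1), ("supervised_live", 2), ("guarded_live", 3)] := by decide
  rw [h]
  simp only [PySem.Dict.getD_eq_get?_getD, PySem.Dict.get?_mk_cons]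
  split_ifs with g0 g1 g2 g3
  · rcases eq_of_beq g0 with rfl; decide
  · rcases eq_of_beq g1 with rfl; decide
  · rcases eq_of_beq g2 with rfl; decide
  · rcases eq_of_beq g3 with rfl; decide
  · simp only [pvRank]
    rw [if_neg (fun hh => g0 (beq_iff_eq.mpr hh.symm)),
      if_neg (fun hh => g1 (beq_iff_eq.mpr hh.symm)),
      if_neg (fun hh => g2 (beq_iff_eq.mpr hh.symm)),
      if_neg (fun hh => g3 (beq_iff_eq.mpr hh.symm))]
    rfl

lemma pvA_eq_foldA (vals : List String) :
    highest_autonomy_mode_py vals = vals.foldl pvStepA "advisory" := by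
  unfold highest_autonomy_mode_py
  have hf : (fun (best raw : String) =>
      let mode := pvNorm raw
      if pvOrder.getD mode (-1) > pvOrder.getD best (-1) then mode else best) = pvStepA := by
    funext b r
    simp only [pvStepA, pvOrder_getD, gt_iff_lt]
  rw [hf]

lemma pvToMode_rank {m : String} (h : pvIsMode m) : pvToMode (pvRank m) = m := by
  rcases h with h | h | h | h <;> subst h <;> decide

lemma pvRank_nonneg {m : String} (h : pvIsMode m) : 0 ≤ pvRank m := by
  rcases h with h | h | h | h <;> subst h <;> decide

lemma pvIsMode_of_rank_pos {m : String} (h : 0 < pvRank m) : pvIsMode m := by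
  unfold pvRank at h; unfold pvIsMode
  split_ifs at h <;> simp_all

lemma pvRank_le_three (m : String) : pvRank m ≤ 3 := by
  unfold pvRank; split_ifs <;> omega

lemma pv_init_le_foldl (l : List String) : ∀ a : Int, a ≤ l.foldl pvStep a := by
  induction l with
  | nil => intro a; exact le_refl a
  | cons v t ih =>
      intro a
      simp only [List.foldl_cons, pvStep]
      exact le_trans (le_max_left a _) (ih _)

lemma pv_foldl_le (l : List String) : ∀ a k : Int, a ≤ k →
    (∀ v ∈ l, pvRank (pvNorm v) ≤ k) → l.foldl pvStep a ≤ k := by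
  induction l with
  | nil => intro a k ha _; exact ha
  | cons v t ih =>
      intro a k ha hm
      simp only [List.foldl_cons, pvStep]
      exact ih _ k (max_le ha (hm v (List.mem_cons_self)))
        (fun w hw => hm w (List.mem_cons_of_mem _ hw))

lemma pv_le_foldl (l : List String) : ∀ a : Int, ∀ v ∈ l,
    pvRank (pvNorm v) ≤ l.foldl pvStep a := by
  induction l with
  | nil => intro a v hv; cases hv
  | cons w t ih =>
      intro a v hv
      simp only [List.foldl_cons, pvStep]
      rcases List.mem_cons.mp hv with h | h
      · subst h
        exact le_trans (le_max_right a _) (pv_init_le_foldl t _)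
      · exact ih _ v h

-- A's fold computes the mode of the maximal rank seen
lemma pvA_fold (vals : List String) : ∀ best : String, pvIsMode best →
    vals.foldl pvStepA best = pvToMode (vals.foldl pvStep (pvRank best)) := by
  induction vals with
  | nil =>
      intro best hb
      simpa using (pvToMode_rank hb).symm
  | cons v t ih =>
      intro best hb
      simp only [List.foldl_cons]
      by_cases h : pvRank (pvNorm v) > pvRank best
      · rw [show pvStepA best v = pvNorm v from by unfold pvStepA; rw [if_pos h],
          ih (pvNorm v) (pvIsMode_of_rank_pos (lt_of_le_of_lt (pvRank_nonneg hb) h)),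
          show pvStep (pvRank best) v = pvRank (pvNorm v) from by unfold pvStep; omega]
      · rw [show pvStepA best v = best from by unfold pvStepA; rw [if_neg h],
          ih best hb,
          show pvStep (pvRank best) v = pvRank best from by unfold pvStep; omega]

lemma pvRank_inj3 {x : String} (hx : pvRank x = 3) : x = "guarded_live" := by
  unfold pvRank at hx; split_ifs at hx <;> first | assumption | omega

lemma pvRank_inj2 {x : String} (hx : pvRank x = 2) : x = "supervised_live" := by
  unfold pvRank at hx; split_ifs at hx <;> first | assumption | omega

lemma pvRank_inj1 {x : String} (hx : pvRank x = 1) : x = "paper" := by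
  unfold pvRank at hx; split_ifs at hx <;> first | assumption | omega

lemma pv_mem_of_rank (vals : List String) (m : String)
    (hinj : ∀ x : String, pvRank x = pvRank m → x = m)
    (h : vals.foldl pvStep 0 = pvRank m) (hpos : 0 < pvRank m) :
    m ∈ vals.map pvNorm := by
  by_contra hmem
  have hle : vals.foldl pvStep 0 ≤ pvRank m - 1 := by
    apply pv_foldl_le _ _ _ (by omega)
    intro v hv
    have h1 : pvRank (pvNorm v) ≤ vals.foldl pvStep 0 := pv_le_foldl vals 0 v hv
    have hne : pvNorm v ≠ m := fun he => hmem (he ▸ List.mem_map_of_mem hv)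
    have hne2 : pvRank (pvNorm v) ≠ pvRank m := fun he => hne (hinj _ he)
    omega
  omega

lemma pv_rank_ge_of_mem (vals : List String) (m : String)
    (h : m ∈ vals.map pvNorm) : pvRank m ≤ vals.foldl pvStep 0 := by
  rcases List.mem_map.mp h with ⟨v, hv, he⟩
  rw [← he]
  exact pv_le_foldl vals 0 v hv

lemma pv_contains_iff (vals : List String) (m : String) :
    PySem.Set.contains (PySem.Set.ofList (vals.map pvNorm)) m = true ↔ m ∈ vals.map pvNorm := by
  rw [PySem.Set.contains_iff, PySem.Set.mem_ofList]

-- B returns the highest mode whose normalized form occurs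
lemma pvB_eq (vals : List String) :
    highest_autonomy_mode_py_alt vals =
      if "guarded_live" ∈ vals.map pvNorm then "guarded_live"
      else if "supervised_live" ∈ vals.map pvNorm then "supervised_live"
      else if "paper" ∈ vals.map pvNorm then "paper" else "advisory" := by
  unfold highest_autonomy_mode_py_alt
  simp only [pvModes, List.reverse_cons, List.reverse_nil, List.nil_append, List.cons_append]
  by_cases hg : "guarded_live" ∈ vals.map pvNorm
  · rw [List.find?_cons_of_pos ((pv_contains_iff vals _).mpr hg), if_pos hg]
    rfl
  · have hc3 : PySem.Set.contains (PySem.Set.ofList (vals.map pvNorm)) "guarded_live" = false := by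
      rw [← Bool.not_eq_true, pv_contains_iff]; exact hg
    rw [List.find?_cons_of_neg (by rw [hc3]; decide), if_neg hg]
    by_cases hs : "supervised_live" ∈ vals.map pvNorm
    · rw [List.find?_cons_of_pos ((pv_contains_iff vals _).mpr hs), if_pos hs]
      rfl
    · have hc2 : PySem.Set.contains (PySem.Set.ofList (vals.map pvNorm)) "supervised_live" = false := by
        rw [← Bool.not_eq_true, pv_contains_iff]; exact hs
      rw [List.find?_cons_of_neg (by rw [hc2]; decide), if_neg hs]
      by_cases hp : "paper" ∈ vals.map pvNorm
      · rw [List.find?_cons_of_pos ((pv_contains_iff vals _).mpr hp), if_pos hp]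
        rfl
      · have hc1 : PySem.Set.contains (PySem.Set.ofList (vals.map pvNorm)) "paper" = false := by
          rw [← Bool.not_eq_true, pv_contains_iff]; exact hp
        rw [List.find?_cons_of_neg (by rw [hc1]; decide), if_neg hp]
        by_cases ha : "advisory" ∈ vals.map pvNorm
        · rw [List.find?_cons_of_pos ((pv_contains_iff vals _).mpr ha)]
          rfl
        · have hc0 : PySem.Set.contains (PySem.Set.ofList (vals.map pvNorm)) "advisory" = false := by
            rw [← Bool.not_eq_true, pv_contains_iff]; exact ha
          rw [List.find?_cons_of_neg (by rw [hc0]; decide)]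
          rfl

-- ===== VERDICT (by name: the statement is the Claim_ definition above) =====
theorem highest_autonomy_mode_py_spec : Claim_equal_highest_autonomy_mode_py := by
  intro vals _
  unfold Spec_highest_autonomy_mode_py
  rw [pvB_eq, pvA_eq_foldA, pvA_fold vals "advisory" (Or.inl rfl),
    show pvRank "advisory" = 0 from by decide]
  set M := vals.foldl pvStep 0 with hM
  have hM0 : (0 : Int) ≤ M := pv_init_le_foldl vals 0
  have hM3 : M ≤ 3 := pv_foldl_le vals 0 3 (by omega) (fun v _ => pvRank_le_three _)
  by_cases hg : "guarded_live" ∈ vals.map pvNorm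
  · have h3 : M = 3 := by
      have h' := pv_rank_ge_of_mem vals _ hg
      rw [show pvRank "guarded_live" = 3 from by decide, ← hM] at h'
      omega
    rw [h3, if_pos hg]
    decide
  · have hMne3 : M ≠ 3 := fun he =>
      hg (pv_mem_of_rank vals "guarded_live"
        (fun x hx => pvRank_inj3 (by rw [hx]; decide))
        (by rw [← hM, he]; decide) (by decide))
    rw [if_neg hg]
    by_cases hs : "supervised_live" ∈ vals.map pvNorm
    · have h2 : M = 2 := by
        have h' := pv_rank_ge_of_mem vals _ hs
        rw [show pvRank "supervised_live" = 2 from by decide, ← hM] at h'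
        omega
      rw [h2, if_pos hs]
      decide
    · have hMne2 : M ≠ 2 := fun he =>
        hs (pv_mem_of_rank vals "supervised_live"
          (fun x hx => pvRank_inj2 (by rw [hx]; decide))
          (by rw [← hM, he]; decide) (by decide))
      rw [if_neg hs]
      by_cases hp : "paper" ∈ vals.map pvNorm
      · have h1 : M = 1 := by
          have h' := pv_rank_ge_of_mem vals _ hp
          rw [show pvRank "paper" = 1 from by decide, ← hM] at h'
          omega
        rw [h1, if_pos hp]
        decide
      · have hMne1 : M ≠ 1 := fun he =>
          hp (pv_mem_of_rank vals "paper"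
            (fun x hx => pvRank_inj1 (by rw [hx]; decide))
            (by rw [← hM, he]; decide) (by decide))
        rw [if_neg hp, show M = 0 from by omega]
        decide
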